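-- pv_equiv track=rewrite | github.com/mbafrani/pm4py-source | pm4py/algo/prediction/versions/keras_rnn.py | group_remaining_time
-- ===== SOURCE A (Python) =====
-- from copy import deepcopy
--
-- def group_remaining_time(change_indexes, remaining_time, max_len_trace):
--     """
--     Groups the remaining time of the extended log according to the change indexes
--
--     Parameters
--     -------------
--     change_indexes
--         Change indexes between cases in the extended log
--     remaining_time
--         List of the remaining times
--     max_len_trace
--         Maximum length of the trace in the log
--
--     Returns
--     -------------
--     rem_time_grouped
--         Remaining time grouped by case
--     """
--     rem_time_grouped = []
--     j = 0
--     for ct in change_indexes: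
--         rem = []
--         added = False
--
--         for i in range(len(ct)):
--             rem.append(remaining_time[j])
--             if i == max_len_trace - 1:
--                 rem_time_grouped.append(deepcopy(rem))
--                 added = True
--             elif i == len(ct) - 1 and not added:
--                 while len(rem) < max_len_trace:
--                     rem.append(rem[-1])
--                 rem_time_grouped.append(deepcopy(rem))
--             j = j + 1
--     return rem_time_grouped
-- ===== SOURCE B (Python) =====
-- def group_remaining_time(change_indexes, remaining_time, max_len_trace):
--     rem_time_grouped = []
--     j = 0
--     for ct in change_indexes:
--         chunk = remaining_time[j:j + len(ct)]
--         j += len(ct)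
--         if not ct:
--             continue
--         if max_len_trace <= 0:
--             rem_time_grouped.append(chunk)
--         else:
--             group = chunk[:max_len_trace]
--             group += [group[-1]] * (max_len_trace - len(group))
--             rem_time_grouped.append(group)
--     return rem_time_grouped
-- ===== Notes on version B (the rewrite author's own statement) =====
-- stated objective: simpler
-- what changed: Replaces A's per-element inner loop with an added-flag and mid-loop emission by one per-case pass: slice the case's chunk out of remaining_time, truncate it to max_len_trace (keeping it whole when max_len_trace <= 0), and pad with the last value by list multiplication.
import Mathlib
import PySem

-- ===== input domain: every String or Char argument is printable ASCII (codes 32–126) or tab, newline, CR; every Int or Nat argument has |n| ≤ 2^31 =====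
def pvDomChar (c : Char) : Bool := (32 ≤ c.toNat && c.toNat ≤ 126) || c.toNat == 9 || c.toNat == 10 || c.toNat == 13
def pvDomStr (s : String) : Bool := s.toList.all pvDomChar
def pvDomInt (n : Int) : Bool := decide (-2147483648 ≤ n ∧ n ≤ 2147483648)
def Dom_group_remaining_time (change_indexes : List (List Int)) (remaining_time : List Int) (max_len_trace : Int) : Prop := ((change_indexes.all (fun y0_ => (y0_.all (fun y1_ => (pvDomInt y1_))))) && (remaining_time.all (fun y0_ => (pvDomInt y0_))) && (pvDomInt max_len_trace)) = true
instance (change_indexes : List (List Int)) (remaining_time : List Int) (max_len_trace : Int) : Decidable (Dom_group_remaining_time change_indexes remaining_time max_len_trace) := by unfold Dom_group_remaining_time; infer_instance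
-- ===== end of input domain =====

-- B replaces A's per-element inner loop (added-flag, mid-loop emission, element-wise while-padding)
-- by one per-case slice-truncate-pad pass; equal return values on Pre_ (objective: simpler).

-- ===== PORT A =====
-- the 'while len(rem) < max_len_trace: rem.append(rem[-1])' loop of A
-- (each pass appends one element, so the loop runs exactly (m - len rem)⁺ times: that count is the fuel)
def padAGo (rem : List Int) : Nat → List Int
  | 0 => rem
  | k + 1 => padAGo (rem ++ [PySem.List.pyGetD rem (-1) 0]) k

def padA (rem : List Int) (m : Int) : List Int :=
  padAGo rem (m - rem.length).toNat

-- the body of A's 'for i in range(len(ct))' loop; state = (rem, added, rem_time_grouped, j)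
def innerStepA (rt : List Int) (m : Int) (n : Int)
    (st : List Int × Bool × List (List Int) × Int) (i : Int) :
    List Int × Bool × List (List Int) × Int :=
  let rem := st.1 ++ [PySem.List.pyGetD rt st.2.2.2 0]
  if i = m - 1 then (rem, true, st.2.2.1 ++ [rem], st.2.2.2 + 1)
  else if i = n - 1 ∧ st.2.1 = false then
    let rem2 := padA rem m
    (rem2, st.2.1, st.2.2.1 ++ [rem2], st.2.2.2 + 1)
  else (rem, st.2.1, st.2.2.1, st.2.2.2 + 1)

-- A's inner loop for one case ct, returning (rem_time_grouped, j)
def innerA (rt : List Int) (m : Int) (ct : List Int)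
    (g : List (List Int)) (j : Int) : List (List Int) × Int :=
  let r := (PySem.List.pyRange 0 (ct.length : Int) 1).foldl
             (innerStepA rt m (ct.length : Int)) ([], false, g, j)
  (r.2.2.1, r.2.2.2)

def group_remaining_time (change_indexes : List (List Int)) (remaining_time : List Int) (max_len_trace : Int) : List (List Int) :=
  (change_indexes.foldl
    (fun (acc : List (List Int) × Int) ct =>
      innerA remaining_time max_len_trace ct acc.1 acc.2)
    ([], 0)).1

-- ===== PORT B =====
def group_remaining_time_alt (change_indexes : List (List Int)) (remaining_time : List Int) (max_len_trace : Int) : List (List Int) :=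
  (change_indexes.foldl
    (fun (acc : List (List Int) × Int) ct =>
      let chunk := PySem.List.slice remaining_time (some acc.2) (some (acc.2 + (ct.length : Int)))
      let j := acc.2 + (ct.length : Int)
      if ct.isEmpty then (acc.1, j)
      else if max_len_trace ≤ 0 then (acc.1 ++ [chunk], j)
      else
        let g0 := PySem.List.slice chunk none (some max_len_trace)
        (acc.1 ++ [g0 ++ List.replicate (max_len_trace - (g0.length : Int)).toNat
                           (PySem.List.pyGetD g0 (-1) 0)], j))
    ([], 0)).1

-- ===== PRECONDITION & SPEC =====
-- Pre_ excludes exactly the inputs where A raises IndexError: the cases list needs more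
-- elements of remaining_time than there are.
def Pre_group_remaining_time (change_indexes : List (List Int)) (remaining_time : List Int) (max_len_trace : Int) : Prop :=
  (change_indexes.map List.length).sum ≤ remaining_time.length
instance (change_indexes : List (List Int)) (remaining_time : List Int) (max_len_trace : Int) : Decidable (Pre_group_remaining_time change_indexes remaining_time max_len_trace) := by unfold Pre_group_remaining_time; infer_instance
def pvWitness_group_remaining_time : List (List Int) × List Int × Int := ([[1], [2, 3]], [5, 6, 7], 2)

def Spec_group_remaining_time (change_indexes : List (List Int)) (remaining_time : List Int) (max_len_trace : Int) (out : List (List Int)) : Prop := out = group_remaining_time_alt change_indexes remaining_time max_len_trace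
instance (change_indexes : List (List Int)) (remaining_time : List Int) (max_len_trace : Int) (out : List (List Int)) : Decidable (Spec_group_remaining_time change_indexes remaining_time max_len_trace out) := by unfold Spec_group_remaining_time; infer_instance

-- ===== CLAIM (what is proved, stated in full; the proofs are below) =====
def Claim_equal_group_remaining_time : Prop := ∀ (change_indexes : List (List Int)) (remaining_time : List Int) (max_len_trace : Int), Dom_group_remaining_time change_indexes remaining_time max_len_trace → Pre_group_remaining_time change_indexes remaining_time max_len_trace → Spec_group_remaining_time change_indexes remaining_time max_len_trace (group_remaining_time change_indexes remaining_time max_len_trace)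

-- ===== LEMMAS AND PROOFS =====


-- closed form of A's while-padding loop
lemma padAGo_closed : ∀ (k : Nat) (rem : List Int),
    padAGo rem k = rem ++ List.replicate k (PySem.List.pyGetD rem (-1) 0)
  | 0, rem => by simp [padAGo]
  | k + 1, rem => by
      rw [padAGo, padAGo_closed k]
      simp [PySem.List.pyGetD_neg_one_append_singleton, List.replicate_succ]

lemma padA_closed (rem : List Int) (m : Int) :
    padA rem m = rem ++ List.replicate (m - rem.length).toNat (PySem.List.pyGetD rem (-1) 0) := by
  rw [padA, padAGo_closed]

-- the single group A emits for a nonempty case whose chunk of remaining times is `chunk`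
def emitA (chunk : List Int) (m : Int) : List Int :=
  if 1 ≤ m ∧ m ≤ (chunk.length : Int) then chunk.take m.toNat else padA chunk m

-- invariant of A's inner loop
lemma innerA_fold (rt : List Int) (m : Int) (n : Nat) (j0 : Nat) (hb : j0 + n ≤ rt.length) :
    ∀ (d k : Nat), k + d = n → ∀ g : List (List Int),
    ((PySem.List.pyRange (k : Int) (n : Int) 1).foldl (innerStepA rt m (n : Int))
        (((rt.drop j0).take n).take k, decide (1 ≤ m ∧ m ≤ (k : Int)), g, ((j0 : Int) + k))).2.2
    = (g ++ (if k = n ∨ (1 ≤ m ∧ m ≤ (k : Int)) then []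
             else [emitA ((rt.drop j0).take n) m]), (j0 : Int) + n) := by
  intro d
  induction d with
  | zero =>
      intro k hk g
      obtain rfl : k = n := by omega
      simp
  | succ d ih =>
      intro k hk g
      have hkn : k < n := by omega
      have hclen : ((rt.drop j0).take n).length = n := by
        simp; omega
      rw [PySem.List.pyRange_one_cons (by exact_mod_cast hkn), List.foldl_cons]
      have hcast : ((k : Int) + 1) = ((k + 1 : Nat) : Int) := by push_cast; ring
      rw [hcast]
      have hidx : j0 + k < rt.length := by omega
      have hrem : ((rt.drop j0).take n).take k ++ [PySem.List.pyGetD rt ((j0:Int) + (k:Int)) 0]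
          = ((rt.drop j0).take n).take (k+1) := by
        have h1 : ((j0:Int) + (k:Int)) = ((j0 + k : Nat) : Int) := by push_cast; ring
        rw [h1, PySem.List.pyGetD_natCast]
        have h2 : rt.getD (j0+k) 0 = rt[j0+k]'hidx := List.getD_eq_getElem rt 0 hidx
        have h3 : ((rt.drop j0).take n)[k]'(by omega) = rt[j0+k]'hidx := by
          simp
        rw [List.take_add_one, h2]
        simp [List.getElem?_eq_getElem (by omega : k < ((rt.drop j0).take n).length), h3]
      by_cases h1 : (k:Int) = m - 1
      · -- branch 'i == max_len_trace - 1': emission by truncation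
        have hm : m = (k:Int) + 1 := by omega
        simp only [innerStepA, hrem, if_pos h1]
        have hst : (true : Bool) = decide (1 ≤ m ∧ m ≤ ((k+1 : Nat) : Int)) := by
          simp; omega
        have hj : ((j0:Int) + (k:Int)) + 1 = (j0:Int) + ((k+1 : Nat) : Int) := by push_cast; ring
        rw [hst, hj, ih (k+1) (by omega) (g ++ [((rt.drop j0).take n).take (k+1)])]
        have hcond : ((k+1 : Nat) = n ∨ (1 ≤ m ∧ m ≤ ((k+1 : Nat) : Int))) := by
          exact Or.inr ⟨by omega, by omega⟩
        rw [if_pos hcond, if_neg (by omega : ¬(k = n ∨ (1 ≤ m ∧ m ≤ (k:Int))))]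
        have hemit : emitA ((rt.drop j0).take n) m = ((rt.drop j0).take n).take (k+1) := by
          rw [emitA, if_pos (by rw [hclen]; exact ⟨by omega, by omega⟩)]
          congr 1
          omega
        rw [hemit]
        simp
      · by_cases h2 : (k:Int) = (n:Int) - 1 ∧ (decide (1 ≤ m ∧ m ≤ (k:Int))) = false
        · -- branch 'i == len(ct) - 1 and not added': emission with padding
          obtain ⟨h2a, h2b⟩ := h2
          have hk1 : k + 1 = n := by omega
          have htake : ((rt.drop j0).take n).take (k+1) = (rt.drop j0).take n := by
            rw [List.take_of_length_le]; omega
          simp only [innerStepA, hrem, if_neg h1, if_pos (And.intro h2a h2b), htake]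
          rw [show ((k + 1 : Nat) : Int) = (n : Int) by omega]
          have hnil : PySem.List.pyRange (n : Int) (n : Int) 1 = [] := by simp
          rw [hnil]
          simp only [List.foldl_nil]
          have hnm : ¬ (1 ≤ m ∧ m ≤ (n:Int)) := by
            have := of_decide_eq_false h2b
            rw [not_and_or] at this ⊢
            rcases this with h | h
            · left; exact h
            · right; omega
          rw [if_neg (by omega : ¬(k = n ∨ (1 ≤ m ∧ m ≤ (k:Int))))]
          rw [emitA, if_neg (by rw [hclen]; exact hnm)]
          rw [show ((j0:Int) + (k:Int) + 1) = ((j0:Int) + (n:Int)) by omega]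
        · -- no emission this iteration
          simp only [innerStepA, hrem, if_neg h1, if_neg h2]
          have hadded : decide (1 ≤ m ∧ m ≤ (k:Int)) = decide (1 ≤ m ∧ m ≤ ((k+1 : Nat) : Int)) := by
            have : m ≠ (k:Int) + 1 := by omega
            push_cast
            by_cases hmk : 1 ≤ m ∧ m ≤ (k:Int) <;> simp [hmk] <;> omega
          have hj : ((j0:Int) + (k:Int)) + 1 = (j0:Int) + ((k+1 : Nat) : Int) := by push_cast; ring
          rw [hadded, hj, ih (k+1) (by omega) g]
          congr 1
          congr 1
          have hiff : ((k+1 : Nat) = n ∨ (1 ≤ m ∧ m ≤ ((k+1:Nat) : Int))) ↔ (k = n ∨ (1 ≤ m ∧ m ≤ (k:Int))) := by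
            by_cases hmk : 1 ≤ m ∧ m ≤ (k:Int)
            · push_cast; omega
            · have hk2 : ¬ ((k:Int) = (n:Int) - 1) := fun hc => h2 ⟨hc, decide_eq_false hmk⟩
              push_cast at hk2 ⊢; omega
          rw [if_congr hiff rfl rfl]

lemma innerA_spec (rt : List Int) (m : Int) (ct : List Int) (g : List (List Int)) (j0 : Nat)
    (hb : j0 + ct.length ≤ rt.length) :
    innerA rt m ct g (j0 : Int)
    = (g ++ (if ct.length = 0 then []
             else [emitA ((rt.drop j0).take ct.length) m]), (j0 : Int) + ct.length) := by
  have h := innerA_fold rt m ct.length j0 hb ct.length 0 (by omega) g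
  simp only [Nat.cast_zero, List.take_zero, add_zero] at h
  rw [show decide (1 ≤ m ∧ m ≤ (0:Int)) = false from by simp; omega] at h
  rw [if_congr (show (0 = ct.length ∨ (1 ≤ m ∧ m ≤ (0:Int))) ↔ ct.length = 0 from by omega) rfl rfl] at h
  simp only [innerA, Prod.mk.eta]
  exact h

-- B's per-case group equals the single group A emits
lemma stepB_emit (rt : List Int) (m : Int) (ct : List Int) (g : List (List Int)) (j0 : Nat)
    (hb : j0 + ct.length ≤ rt.length) :
    (let chunk := PySem.List.slice rt (some (j0 : Int)) (some ((j0 : Int) + (ct.length : Int)))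
     let j := (j0 : Int) + (ct.length : Int)
     if ct.isEmpty then (g, j)
     else if m ≤ 0 then (g ++ [chunk], j)
     else
       let g0 := PySem.List.slice chunk none (some m)
       (g ++ [g0 ++ List.replicate (m - (g0.length : Int)).toNat (PySem.List.pyGetD g0 (-1) 0)], j))
    = (g ++ (if ct.length = 0 then []
             else [emitA ((rt.drop j0).take ct.length) m]), (j0 : Int) + ct.length) := by
  simp only [PySem.List.slice_natCast_add]
  have hcl : ((rt.drop j0).take ct.length).length = ct.length := by simp; omega
  by_cases hemp : ct.isEmpty
  · rw [if_pos hemp, if_pos (List.isEmpty_iff_length_eq_zero.mp hemp)]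
    simp
  · have hn0 : ct.length ≠ 0 := fun h => hemp (List.isEmpty_iff_length_eq_zero.mpr h)
    rw [if_neg hemp, if_neg hn0]
    by_cases hm0 : m ≤ 0
    · rw [if_pos hm0, emitA, if_neg (by rw [hcl]; omega)]
      rw [padA_closed, hcl, show (m - (ct.length : Int)).toNat = 0 from by omega]
      simp
    · rw [if_neg hm0]
      rw [PySem.List.slice_to _ (by omega : (0:Int) ≤ m)]
      by_cases hmn : m ≤ (ct.length : Int)
      · have hlen : (((rt.drop j0).take ct.length).take m.toNat).length = m.toNat := by
          rw [List.length_take, hcl]; omega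
        rw [emitA, if_pos ⟨by omega, by rw [hcl]; exact hmn⟩]
        rw [hlen, show (m - (m.toNat : Int)).toNat = 0 from by omega]
        simp
      · have htk : ((rt.drop j0).take ct.length).take m.toNat = (rt.drop j0).take ct.length := by
          rw [List.take_of_length_le]; omega
        rw [emitA, if_neg (by rw [hcl]; omega), htk, hcl, padA_closed, hcl]

-- A's outer fold equals B's outer fold
lemma outer_fold (rt : List Int) (m : Int) (cts : List (List Int)) :
    ∀ (g : List (List Int)) (j0 : Nat),
    j0 + (cts.map List.length).sum ≤ rt.length →
    cts.foldl (fun acc ct => innerA rt m ct acc.1 acc.2) (g, (j0 : Int))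
    = cts.foldl (fun (acc : List (List Int) × Int) ct =>
        let chunk := PySem.List.slice rt (some acc.2) (some (acc.2 + (ct.length : Int)))
        let j := acc.2 + (ct.length : Int)
        if ct.isEmpty then (acc.1, j)
        else if m ≤ 0 then (acc.1 ++ [chunk], j)
        else
          let g0 := PySem.List.slice chunk none (some m)
          (acc.1 ++ [g0 ++ List.replicate (m - (g0.length : Int)).toNat
                       (PySem.List.pyGetD g0 (-1) 0)], j))
        (g, (j0 : Int)) := by
  induction cts with
  | nil => intro g j0 _; rfl
  | cons ct rest ih =>
      intro g j0 hb
      have hbn : j0 + ct.length ≤ rt.length := by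
        simp only [List.map_cons, List.sum_cons] at hb; omega
      simp only [List.foldl_cons]
      rw [innerA_spec rt m ct g j0 hbn]
      rw [stepB_emit rt m ct g j0 hbn]
      rw [show ((j0 : Int) + (ct.length : Int)) = ((j0 + ct.length : Nat) : Int) from by push_cast; ring]
      apply ih
      simp only [List.map_cons, List.sum_cons] at hb; omega

theorem group_remaining_time_spec : Claim_equal_group_remaining_time := by
  intro ci rt m _ hpre
  unfold Spec_group_remaining_time group_remaining_time group_remaining_time_alt
  have h := outer_fold rt m ci [] 0 (by simpa using hpre)
  simp only [Nat.cast_zero] at h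
  rw [h]
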